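-- pv_equiv track=rewrite | github.com/vkupershtein/document-comparer | backend/document_comparer/utils.py | merge_sentences
-- ===== SOURCE A (Python) =====
-- from typing import Dict, Iterator, List, Set, Tuple
--
-- def merge_sentences(sentences: List[str],
--                     sent_positions: Set[int]) -> List[str]:
--     """
--     Merge previously split paragraph in less paragraphs
--     if neighbouring sentences are in the set
--     """
--     result = []
--     temp = []
--     sign = True
--
--     for i, sentence in enumerate(sentences):
--         if i in sent_positions:
--             if not sign and temp:
--                 result.append(temp)
--                 temp = []
--             temp.append(sentence)
--             sign = True
--         else:
--             if sign and temp: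
--                 result.append(temp)
--                 temp = []
--             temp.append(sentence)
--             sign = False
--     if temp:
--         result.append(temp)
--     return result
-- ===== SOURCE B (Python) =====
-- from typing import List, Set
--
-- def merge_sentences(sentences: List[str],
--                     sent_positions: Set[int]) -> List[str]:
--     """Two-stage: compute the cut points where membership in sent_positions
--     flips, then slice the sentence list between consecutive cut points."""
--     n = len(sentences)
--     if n == 0:
--         return []
--     keys = [i in sent_positions for i in range(n)]
--     cuts = [0] + [i for i in range(1, n) if keys[i] != keys[i - 1]] + [n]
--     return [sentences[a:b] for a, b in zip(cuts, cuts[1:])]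
-- ===== Notes on version B (the rewrite author's own statement) =====
-- stated objective: alternative
-- what changed: Replaced A's single-pass flag/flush accumulator with two staged passes: first compute the cut indices where membership in sent_positions flips, then slice the sentence list between consecutive cut points.
import Mathlib
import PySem

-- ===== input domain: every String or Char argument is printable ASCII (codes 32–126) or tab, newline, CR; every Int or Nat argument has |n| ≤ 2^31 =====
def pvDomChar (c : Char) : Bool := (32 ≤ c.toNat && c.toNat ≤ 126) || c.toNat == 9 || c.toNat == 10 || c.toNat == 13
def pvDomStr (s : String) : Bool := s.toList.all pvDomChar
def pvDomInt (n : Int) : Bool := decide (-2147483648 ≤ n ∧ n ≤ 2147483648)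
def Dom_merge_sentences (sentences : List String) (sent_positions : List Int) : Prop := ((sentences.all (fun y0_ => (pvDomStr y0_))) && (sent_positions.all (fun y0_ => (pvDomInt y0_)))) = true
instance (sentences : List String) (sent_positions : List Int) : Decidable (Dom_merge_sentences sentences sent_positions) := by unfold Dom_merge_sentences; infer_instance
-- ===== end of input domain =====

-- B replaces A's single-pass flag/flush accumulator with two staged passes: first compute the
-- cut indices where set membership flips, then slice the list between consecutive cuts (alternative).

-- ===== PORT A =====
-- one iteration of A's for-loop body; state = (result, temp, sign)
def msStep (sent_positions : List Int) (st : List (List String) × List String × Bool)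
    (p : Int × String) : List (List String) × List String × Bool :=
  let result := st.1
  let temp := st.2.1
  let sign := st.2.2
  if sent_positions.contains p.1 then
    if !sign && !temp.isEmpty then (result ++ [temp], [p.2], true)
    else (result, temp ++ [p.2], true)
  else
    if sign && !temp.isEmpty then (result ++ [temp], [p.2], false)
    else (result, temp ++ [p.2], false)

def merge_sentences (sentences : List String) (sent_positions : List Int) : List (List String) :=
  let st := (PySem.List.enumerate sentences).foldl (msStep sent_positions) ([], [], true)
  if st.2.1.isEmpty then st.1 else st.1 ++ [st.2.1]

-- ===== PORT B =====
-- keys[i] / keys[i-1] are always in range (1 ≤ i < n, keys has length n), so pyGetD is exact here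
def merge_sentences_alt (sentences : List String) (sent_positions : List Int) : List (List String) :=
  let n : Int := PySem.List.len sentences
  if n = 0 then []
  else
    let keys : List Bool := (PySem.List.pyRange 0 n 1).map (fun i => sent_positions.contains i)
    let cuts : List Int := [0] ++ (PySem.List.pyRange 1 n 1).filter
        (fun i => PySem.List.pyGetD keys i false != PySem.List.pyGetD keys (i - 1) false) ++ [n]
    (cuts.zip (PySem.List.slice cuts (some 1) none)).map
      (fun p => PySem.List.slice sentences (some p.1) (some p.2))

-- ===== PRECONDITION & SPEC =====
def Spec_merge_sentences (sentences : List String) (sent_positions : List Int) (out : List (List String)) : Prop := out = merge_sentences_alt sentences sent_positions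
instance (sentences : List String) (sent_positions : List Int) (out : List (List String)) : Decidable (Spec_merge_sentences sentences sent_positions out) := by unfold Spec_merge_sentences; infer_instance

-- ===== CLAIM (what is proved, stated in full; the proofs are below) =====
def Claim_equal_merge_sentences : Prop := ∀ (sentences : List String) (sent_positions : List Int), Dom_merge_sentences sentences sent_positions → Spec_merge_sentences sentences sent_positions (merge_sentences sentences sent_positions)

-- ===== LEMMAS AND PROOFS =====

-- characterisation of A: groups of consecutive indices with equal membership key
def msSpan (key : Int → Bool) (b : Bool) : List (Int × String) → List String × List (Int × String)
  | [] => ([], [])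
  | (i, s) :: rest =>
    if key i = b then
      let r := msSpan key b rest
      (s :: r.1, r.2)
    else ([], (i, s) :: rest)

theorem msSpan_len (key : Int → Bool) (b : Bool) (l : List (Int × String)) :
    (msSpan key b l).2.length ≤ l.length := by
  induction l with
  | nil => simp [msSpan]
  | cons p rest ih =>
    obtain ⟨i, s⟩ := p
    simp only [msSpan]
    split
    · exact Nat.le_succ_of_le ih
    · simp

def msGroups (key : Int → Bool) : List (Int × String) → List (List String)
  | [] => []
  | (i, s) :: rest =>
    let r := msSpan key (key i) rest
    (s :: r.1) :: msGroups key r.2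
  termination_by l => l.length
  decreasing_by exact Nat.lt_succ_of_le (msSpan_len _ _ _)

def msFinalize (st : List (List String) × List String × Bool) : List (List String) :=
  if st.2.1.isEmpty then st.1 else st.1 ++ [st.2.1]

theorem ms_main (sp : List Int) (l : List (Int × String)) :
    ∀ (res : List (List String)) (temp : List String) (sign : Bool), temp ≠ [] →
    msFinalize (l.foldl (msStep sp) (res, temp, sign)) =
      res ++ ((temp ++ (msSpan (fun i => sp.contains i) sign l).1)
        :: msGroups (fun i => sp.contains i) (msSpan (fun i => sp.contains i) sign l).2) := by
  induction l with
  | nil =>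
    intro res temp sign ht
    simp [msFinalize, msSpan, msGroups, List.isEmpty_iff, ht]
  | cons p rest ih =>
    intro res temp sign ht
    obtain ⟨i, s⟩ := p
    by_cases hk : sp.contains i = sign
    · -- same key: temp extends, no flush
      have hstep : msStep sp (res, temp, sign) (i, s) = (res, temp ++ [s], sign) := by
        cases sign with
        | true =>
          have hm : i ∈ sp := by simpa using hk
          simp [msStep, hm]
        | false =>
          have hm : i ∉ sp := by simpa using hk
          simp [msStep, hm]
      have hspan : msSpan (fun i => sp.contains i) sign ((i, s) :: rest)
          = (s :: (msSpan (fun i => sp.contains i) sign rest).1,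
             (msSpan (fun i => sp.contains i) sign rest).2) := by
        simp only [msSpan]
        rw [if_pos hk]
      rw [List.foldl_cons, hstep, ih res (temp ++ [s]) sign (by simp), hspan]
      simp
    · -- key flips: flush temp, start new run
      have hstep : msStep sp (res, temp, sign) (i, s) = (res ++ [temp], [s], sp.contains i) := by
        cases sign with
        | true =>
          have hm : i ∉ sp := by
            intro hmem
            exact hk (by simpa using hmem)
          simp [msStep, hm, ht]
        | false =>
          have hm : i ∈ sp := by
            by_contra hmem
            exact hk (by simpa using hmem)
          simp [msStep, hm, ht]
      have hspan : msSpan (fun i => sp.contains i) sign ((i, s) :: rest) = ([], (i, s) :: rest) := by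
        simp only [msSpan]
        rw [if_neg hk]
      rw [List.foldl_cons, hstep, ih (res ++ [temp]) [s] (sp.contains i) (by simp), hspan]
      simp only [msGroups]
      simp

theorem ms_top (sp : List Int) (l : List (Int × String)) :
    msFinalize (l.foldl (msStep sp) ([], [], true)) = msGroups (fun i => sp.contains i) l := by
  cases l with
  | nil => simp [msFinalize, msGroups]
  | cons p rest =>
    obtain ⟨i, s⟩ := p
    have hstep : msStep sp ([], [], true) (i, s) = ([], [s], sp.contains i) := by
      by_cases hm : i ∈ sp <;> simp [msStep, hm]
    rw [List.foldl_cons, hstep, ms_main sp rest [] [s] (sp.contains i) (by simp)]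
    simp only [msGroups]
    simp

-- B-side helpers for the proof: pairing consecutive cuts, and the leading run length
def msPairs (full : List String) : Int → List Int → List (List String)
  | _, [] => []
  | a, c :: cs => PySem.List.slice full (some a) (some c) :: msPairs full c cs

theorem msPairs_zip (full : List String) (f : Int × Int → List String)
    (hf : ∀ a b, f (a, b) = PySem.List.slice full (some a) (some b)) :
    ∀ (cs : List Int) (a : Int), ((a :: cs).zip cs).map f = msPairs full a cs := by
  intro cs
  induction cs with
  | nil => intro a; simp [msPairs]
  | cons c cs ih => intro a; simp [msPairs, hf, ih c]

def msCnt (key : Int → Bool) (b : Bool) : Int → List String → Nat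
  | _, [] => 0
  | k, _ :: xs => if key k = b then msCnt key b (k + 1) xs + 1 else 0

theorem msCnt_nil (key : Int → Bool) (b : Bool) (k : Int) : msCnt key b k [] = 0 := rfl

theorem msCnt_cons (key : Int → Bool) (b : Bool) (k : Int) (x : String) (xs : List String) :
    msCnt key b k (x :: xs) = if key k = b then msCnt key b (k + 1) xs + 1 else 0 := rfl

theorem msPairs_nil (full : List String) (a : Int) : msPairs full a [] = [] := rfl

theorem msPairs_cons (full : List String) (a c : Int) (cs : List Int) :
    msPairs full a (c :: cs) = PySem.List.slice full (some a) (some c) :: msPairs full c cs := rfl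

theorem msCnt_le (key : Int → Bool) (b : Bool) :
    ∀ (xs : List String) (k : Int), msCnt key b k xs ≤ xs.length := by
  intro xs
  induction xs with
  | nil => intro k; simp [msCnt_nil]
  | cons x xs ih =>
    intro k
    rw [msCnt_cons]
    have h2 := ih (k + 1)
    simp only [List.length_cons]
    split_ifs with h
    · omega
    · omega

theorem msCnt_run (key : Int → Bool) (b : Bool) :
    ∀ (xs : List String) (k : Int) (j : Nat), j < msCnt key b k xs → key (k + j) = b := by
  intro xs
  induction xs with
  | nil => intro k j hj; rw [msCnt_nil] at hj; omega
  | cons x xs ih =>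
    intro k j hj
    rw [msCnt_cons] at hj
    split_ifs at hj with h
    · cases j with
      | zero => simpa using h
      | succ j =>
        have := ih (k + 1) j (by omega)
        have harith : k + ((j + 1 : Nat) : Int) = (k + 1) + (j : Nat) := by push_cast; ring
        rw [harith]; exact this
    · omega

theorem msCnt_stop (key : Int → Bool) (b : Bool) :
    ∀ (xs : List String) (k : Int), msCnt key b k xs < xs.length →
      key (k + msCnt key b k xs) ≠ b := by
  intro xs
  induction xs with
  | nil => intro k h; simp [msCnt_nil] at h
  | cons x xs ih =>
    intro k h
    rw [msCnt_cons] at h ⊢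
    split_ifs at h ⊢ with hk
    · simp only [List.length_cons] at h
      have hlt : msCnt key b (k + 1) xs < xs.length := by omega
      have := ih (k + 1) hlt
      intro hc
      apply this
      have harith : (k + 1) + (msCnt key b (k + 1) xs : Int)
          = k + ((msCnt key b (k + 1) xs + 1 : Nat) : Int) := by push_cast; ring
      rw [harith]
      exact hc
    · simpa using hk

-- msSpan over an enumerated suffix takes exactly the leading run
theorem msSpan_enum (key : Int → Bool) (b : Bool) :
    ∀ (xs : List String) (k : Int),
      msSpan key b (PySem.List.enumerate xs k) =
        (xs.take (msCnt key b k xs),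
         PySem.List.enumerate (xs.drop (msCnt key b k xs)) (k + msCnt key b k xs)) := by
  intro xs
  induction xs with
  | nil => intro k; simp [msSpan, msCnt_nil, PySem.List.enumerate_nil]
  | cons x xs ih =>
    intro k
    rw [PySem.List.enumerate_cons, msCnt_cons]
    simp only [msSpan]
    by_cases hk : key k = b
    · rw [if_pos hk, if_pos hk, ih (k + 1)]
      simp only [List.take_succ_cons, List.drop_succ_cons, Prod.mk.injEq, true_and]
      congr 1
      omega
    · rw [if_neg hk, if_neg hk]
      simp [PySem.List.enumerate_cons]

-- the central bridge: msGroups on the suffix from a cut start a = pairs of consecutive cuts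
theorem ms_bridge (key : Int → Bool) (full : List String) :
    ∀ (a : Nat), a < full.length →
      msPairs full (a : Int)
        ((PySem.List.pyRange ((a : Int) + 1) (full.length : Int) 1).filter
            (fun i => key i != key (i - 1)) ++ [(full.length : Int)]) =
      msGroups key (PySem.List.enumerate (full.drop a) (a : Int)) := by
  intro a
  induction hw : full.length - a using Nat.strong_induction_on generalizing a with
  | _ m ih =>
  intro ha
  -- decompose the suffix
  have hdrop : full.drop a = full[a] :: full.drop (a + 1) := (List.getElem_cons_drop ha).symm
  set x := full[a] with hx
  set rest := full.drop (a + 1) with hrest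
  have hrlen : rest.length = full.length - (a + 1) := by simp [hrest]
  set b := key (a : Int) with hb
  set t := msCnt key b ((a : Int) + 1) rest with ht
  have htle : t ≤ rest.length := by rw [ht]; exact msCnt_le key b rest _
  set c := a + 1 + t with hc
  have hcle : c ≤ full.length := by omega
  -- RHS: one group then recurse
  have hspan := msSpan_enum key b rest ((a : Int) + 1)
  rw [← ht] at hspan
  have hrhs : msGroups key (PySem.List.enumerate (full.drop a) (a : Int)) =
      (x :: rest.take t) :: msGroups key (PySem.List.enumerate (full.drop c) (c : Int)) := by
    rw [hdrop, PySem.List.enumerate_cons, msGroups, ← hb, hspan]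
    have h1 : full.drop c = rest.drop t := by
      rw [hrest, List.drop_drop]
    have h2 : ((a : Int) + 1) + (t : Int) = (c : Int) := by rw [hc]; push_cast; ring
    rw [h1, ← h2]
  -- key is constant on [a, c)
  have hrun : ∀ i : Nat, a ≤ i → i < c → key (i : Int) = b := by
    intro i hi1 hi2
    rcases Nat.eq_or_lt_of_le hi1 with h | h
    · rw [← h, hb]
    · have hj : i - (a + 1) < t := by omega
      have := msCnt_run key b rest ((a : Int) + 1) (i - (a + 1)) (by rw [← ht] at *; exact hj)
      have harith : ((a : Int) + 1) + ((i - (a + 1) : Nat) : Int) = (i : Int) := by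
        have hi : (a + 1) + (i - (a + 1)) = i := by omega
        omega
      rwa [harith] at this
  -- the filtered range from a+1 splits at c
  have hfilter :
      (PySem.List.pyRange ((a : Int) + 1) (full.length : Int) 1).filter
          (fun i => key i != key (i - 1)) =
        (if c < full.length then
          (c : Int) :: (PySem.List.pyRange ((c : Int) + 1) (full.length : Int) 1).filter
            (fun i => key i != key (i - 1))
         else []) := by
    have hsplit : PySem.List.pyRange ((a : Int) + 1) (full.length : Int) 1 =
        PySem.List.pyRange ((a : Int) + 1) (c : Int) 1 ++
        PySem.List.pyRange (c : Int) (full.length : Int) 1 := by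
      apply PySem.List.pyRange_one_append
      · omega
      · exact_mod_cast hcle
    have hnil : (PySem.List.pyRange ((a : Int) + 1) (c : Int) 1).filter
        (fun i => key i != key (i - 1)) = [] := by
      rw [List.filter_eq_nil_iff]
      intro i hi
      rw [PySem.List.mem_pyRange_one] at hi
      obtain ⟨j, rfl⟩ : ∃ j : Nat, i = (j : Int) := ⟨i.toNat, by omega⟩
      have h1 : key ((j : Int)) = b := hrun j (by omega) (by omega)
      have h2 : key ((j : Int) - 1) = b := by
        have hj : ((j : Int)) - 1 = ((j - 1 : Nat) : Int) := by omega
        rw [hj]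
        exact hrun (j - 1) (by omega) (by omega)
      simp [h1, h2]
    rw [hsplit, List.filter_append, hnil, List.nil_append]
    by_cases hcn : c < full.length
    · rw [if_pos hcn]
      rw [PySem.List.pyRange_one_cons (by exact_mod_cast hcn)]
      rw [List.filter_cons]
      have hkc : key (c : Int) ≠ b := by
        have hstop := msCnt_stop key b rest ((a : Int) + 1) (by omega)
        rw [← ht] at hstop
        have harith : ((a : Int) + 1) + (t : Int) = (c : Int) := by rw [hc]; push_cast; ring
        rwa [harith] at hstop
      have hkc1 : key ((c : Int) - 1) = b := by
        have hj : ((c : Int)) - 1 = ((c - 1 : Nat) : Int) := by omega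
        rw [hj]
        exact hrun (c - 1) (by omega) (by omega)
      have hcond : (key (c : Int) != key ((c : Int) - 1)) = true := by
        rw [hkc1]
        simp only [bne_iff_ne]
        exact hkc
      rw [if_pos hcond]
    · rw [if_neg hcn]
      have hemp : PySem.List.pyRange (c : Int) (full.length : Int) 1 = [] := by
        apply PySem.List.pyRange_one_eq_nil
        have hcc : full.length ≤ c := by omega
        exact_mod_cast hcc
      rw [hemp, List.filter_nil]
  rw [hfilter, hrhs]
  by_cases hcn : c < full.length
  · rw [if_pos hcn]
    rw [List.cons_append, msPairs_cons]
    have hslice : PySem.List.slice full (some (a : Int)) (some (c : Int)) = x :: rest.take t := by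
      rw [PySem.List.slice_natCast, hdrop]
      have hca : c - a = t + 1 := by omega
      rw [hca, List.take_succ_cons]
    rw [hslice]
    congr 1
    exact ih (full.length - c) (by omega) c rfl hcn
  · rw [if_neg hcn]
    have hceq : c = full.length := by omega
    rw [List.nil_append, msPairs_cons, msPairs_nil]
    have hslice : PySem.List.slice full (some (a : Int)) (some (full.length : Int))
        = x :: rest.take t := by
      rw [PySem.List.slice_natCast, hdrop]
      have hteq : t = rest.length := by omega
      have hna : full.length - a = rest.length + 1 := by omega
      rw [hna, List.take_succ_cons, hteq, List.take_length]
    rw [hslice]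
    have hdn : full.drop c = [] := by
      apply List.drop_eq_nil_of_le
      omega
    rw [hdn]
    simp [PySem.List.enumerate_nil, msGroups]

-- ===== VERDICT (by name: the statement is the Claim_ definition above) =====
theorem merge_sentences_spec : Claim_equal_merge_sentences := by
  intro sentences sent_positions _
  unfold Spec_merge_sentences
  show merge_sentences sentences sent_positions = merge_sentences_alt sentences sent_positions
  unfold merge_sentences merge_sentences_alt
  simp only [PySem.List.len_eq]
  by_cases hnil : sentences = []
  · subst hnil
    simp [PySem.List.enumerate_nil]
  · have hlen : (sentences.length : Int) ≠ 0 := by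
      simpa using fun h => hnil (List.length_eq_zero_iff.mp h)
    rw [if_neg hlen]
    have hA := ms_top sent_positions (PySem.List.enumerate sentences)
    simp only [msFinalize] at hA
    rw [hA]
    set key : Int → Bool := fun i => sent_positions.contains i with hkey
    set keys := (PySem.List.pyRange 0 (sentences.length : Int) 1).map key with hkeys
    have hkfilter :
        (PySem.List.pyRange 1 (sentences.length : Int) 1).filter
            (fun i => PySem.List.pyGetD keys i false != PySem.List.pyGetD keys (i - 1) false) =
        (PySem.List.pyRange 1 (sentences.length : Int) 1).filter
            (fun i => key i != key (i - 1)) := by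
      apply List.filter_congr
      intro i hi
      rw [PySem.List.mem_pyRange_one] at hi
      rw [hkeys]
      rw [PySem.List.pyGetD_map_pyRange_of_nonneg key _ i false (by omega) (by omega)]
      rw [PySem.List.pyGetD_map_pyRange_of_nonneg key _ (i - 1) false (by omega) (by omega)]
    rw [PySem.List.slice_from_one, hkfilter]
    simp only [List.cons_append, List.nil_append, List.tail_cons]
    rw [msPairs_zip sentences _ (fun a b => rfl)
        ((PySem.List.pyRange 1 (sentences.length : Int) 1).filter
            (fun i => key i != key (i - 1)) ++ [(sentences.length : Int)]) 0]
    have h0 : sentences.length > 0 := List.length_pos_iff.mpr hnil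
    have hbr := (ms_bridge key sentences 0 h0).symm
    simp only [Nat.cast_zero, List.drop_zero, zero_add] at hbr
    rw [← hbr]
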